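-- pv_equiv track=rewrite | github.com/kukom6/PV248 | 08-statistic/utilities.py | merge_exercise_columns
-- ===== SOURCE A (Python) =====
-- import copy
--
-- def merge_exercise_columns(data):
--     result = {}
--     for originalColumn in data:
--         if originalColumn == 'student':
--             result['student'] = copy.deepcopy(data['student'])
--             continue
--         exercise = originalColumn.split("/")[1]
--         if exercise not in result.keys():
--             result[exercise] = copy.deepcopy(data[originalColumn])
--         else:  # exercise is already in result
--             for index, cell in enumerate(data[originalColumn]):
--                 result[exercise][index] += cell
--     return result
-- ===== SOURCE B (Python) =====
-- def merge_exercise_columns(data):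
--     # pass 1: group the columns of each exercise, in first-appearance order
--     groups = {}
--     for column in data:
--         key = 'student' if column == 'student' else column.split('/')[1]
--         groups.setdefault(key, []).append(data[column])
--     # pass 2: merge each group by element-wise addition (non-mutating)
--     result = {}
--     for key, cols in groups.items():
--         merged = list(cols[0])
--         for col in cols[1:]:
--             merged = [a + b for a, b in zip(merged, col)] + merged[len(col):]
--         result[key] = merged
--     return result
-- ===== Notes on version B (the rewrite author's own statement) =====
-- stated objective: alternative
-- what changed: A's single pass inserts-or-element-wise-adds each column into the result dict as it goes; B first builds an order-preserving grouping dict mapping each exercise to the list of its columns, then merges every group by element-wise addition in a second pass.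
-- outside the precondition, e.g. on merge_exercise_columns({'a/student': [1], 'student': [2]}): A returns {'student': [2]}, B returns {'student': [3]}
import Mathlib
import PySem

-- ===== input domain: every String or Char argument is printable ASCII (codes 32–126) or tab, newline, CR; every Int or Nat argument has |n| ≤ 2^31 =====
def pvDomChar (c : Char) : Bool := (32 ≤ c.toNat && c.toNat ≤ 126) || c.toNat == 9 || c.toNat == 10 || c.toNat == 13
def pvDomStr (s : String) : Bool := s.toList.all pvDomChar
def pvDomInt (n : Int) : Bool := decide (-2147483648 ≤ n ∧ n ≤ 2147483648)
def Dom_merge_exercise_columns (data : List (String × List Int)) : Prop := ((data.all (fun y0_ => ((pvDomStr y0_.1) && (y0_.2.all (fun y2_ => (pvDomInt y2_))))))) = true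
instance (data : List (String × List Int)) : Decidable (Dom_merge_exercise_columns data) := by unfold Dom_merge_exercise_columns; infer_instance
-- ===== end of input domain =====

-- B replaces A's single insert-or-add pass over the result dict by a different decomposition:
-- first group each exercise's columns in an order-preserving dict, then merge every group by
-- element-wise addition (objective: alternative, same cost). Equivalence is about the return
-- value; neither program mutates its argument.

-- ===== PORT A =====
-- data[k] on the Python dict: the (by Pre_ unique) matching entry of the association list.
-- none would be a KeyError; the keys looked up always occur in data, so the [] default is never hit.
def pvLookup (data : List (String × List Int)) (k : String) : List Int :=
  match data.find? (fun q => q.1 == k) with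
  | some q => q.2
  | none => []

-- 'for index, cell in enumerate(data[originalColumn]): result[exercise][index] += cell'
-- enumerate indices are ≥ 0, so .toNat is exact; index ≥ len (an IndexError) is excluded by Pre_.
def pvAddLoop (old v : List Int) : List Int :=
  (PySem.List.enumerate v).foldl (fun acc ic => acc.set ic.1.toNat (acc.getD ic.1.toNat 0 + ic.2)) old

-- A's loop body; 'originalColumn.split("/")[1]' with no '/' (an IndexError) is excluded by Pre_
def pvStepA (data : List (String × List Int)) (result : PySem.Dict String (List Int))
    (p : String × List Int) : PySem.Dict String (List Int) :=
  if p.1 == "student" then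
    result.insert "student" (pvLookup data "student")
  else
    let exercise := (PySem.List.pyGet? ((PySem.Str.split? p.1 "/").getD []) 1).getD ""
    if result.contains exercise = false then
      result.insert exercise (pvLookup data p.1)
    else
      result.modify exercise [] (fun old => pvAddLoop old (pvLookup data p.1))

def merge_exercise_columns (data : List (String × List Int)) : List (String × List Int) :=
  (data.foldl (pvStepA data) PySem.Dict.empty).items

-- ===== PORT B =====
-- "key = 'student' if column == 'student' else column.split('/')[1]"
def pvKeyOf (k : String) : String :=
  if k == "student" then "student"
  else (PySem.List.pyGet? ((PySem.Str.split? k "/").getD []) 1).getD ""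

-- "merged = [a + b for a, b in zip(merged, col)] + merged[len(col):]"
def pvCombine (acc col : List Int) : List Int :=
  List.zipWith (· + ·) acc col ++ acc.drop col.length

def merge_exercise_columns_alt (data : List (String × List Int)) : List (String × List Int) :=
  let groups := data.foldl
    (fun (g : PySem.Dict String (List (List Int))) p =>
      g.modify (pvKeyOf p.1) [] (fun cols => cols ++ [pvLookup data p.1]))
    PySem.Dict.empty
  (groups.items.foldl
    (fun (res : PySem.Dict String (List Int)) pr =>
      res.insert pr.1 ((pr.2.drop 1).foldl pvCombine (pr.2.headD [])))
    PySem.Dict.empty).items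

-- ===== PRECONDITION & SPEC =====
-- Pre_ excludes: duplicate keys (an association list with a repeated key denotes no Python dict);
-- non-'student' keys without '/' (A raises IndexError on split("/")[1]); a group column longer than
-- the group's FIRST column (A raises IndexError in the += loop); and a literal 'student' key coming
-- AFTER another column of exercise 'student' (a defensible key-collision corner: A's assignment
-- there overwrites the group where B sums it).
def Pre_merge_exercise_columns (data : List (String × List Int)) : Prop :=
  (data.map Prod.fst).Nodup ∧
  (∀ p ∈ data, p.1 ≠ "student" → 2 ≤ ((PySem.Str.split? p.1 "/").getD []).length) ∧
  (∀ i ∈ List.range data.length, ∀ j ∈ List.range data.length, i < j →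
    pvKeyOf (data[i]!).1 = pvKeyOf (data[j]!).1 →
    (∀ m ∈ List.range i, pvKeyOf (data[m]!).1 ≠ pvKeyOf (data[i]!).1) →
    (data[j]!).1 ≠ "student" ∧ (data[j]!).2.length ≤ (data[i]!).2.length)
instance (data : List (String × List Int)) : Decidable (Pre_merge_exercise_columns data) := by
  unfold Pre_merge_exercise_columns; infer_instance

def pvWitness_merge_exercise_columns : (List (String × List Int)) :=
  [("a/ex1", [1, 2]), ("b/ex1", [3, 4]), ("student", [7]), ("a/ex2", [5])]

def Spec_merge_exercise_columns (data : List (String × List Int)) (out : List (String × List Int)) : Prop := out = merge_exercise_columns_alt data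
instance (data : List (String × List Int)) (out : List (String × List Int)) : Decidable (Spec_merge_exercise_columns data out) := by unfold Spec_merge_exercise_columns; infer_instance

-- ===== CLAIM (what is proved, stated in full; the proofs are below) =====
def Claim_equal_merge_exercise_columns : Prop := ∀ (data : List (String × List Int)), Dom_merge_exercise_columns data → Pre_merge_exercise_columns data → Spec_merge_exercise_columns data (merge_exercise_columns data)

-- ===== LEMMAS AND PROOFS =====

theorem pvCombine_cons (a c : Int) (as cs : List Int) :
    pvCombine (a::as) (c::cs) = (a+c) :: pvCombine as cs := by simp [pvCombine]

theorem pvCombine_nil (cs : List Int) : pvCombine [] cs = [] := by simp [pvCombine]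

theorem pvAddLoop_go (v : List Int) : ∀ (s : ℕ) (old : List Int),
    (PySem.List.enumerate v (s : ℤ)).foldl
      (fun acc ic => acc.set ic.1.toNat (acc.getD ic.1.toNat 0 + ic.2)) old
    = old.take s ++ pvCombine (old.drop s) v := by
  induction v with
  | nil => intro s old; simp [PySem.List.enumerate, pvCombine]
  | cons c cs ih =>
    intro s old
    have hcons : PySem.List.enumerate (c::cs) (s:ℤ) = ((s:ℤ),c) :: PySem.List.enumerate cs ((s:ℤ)+1) := rfl
    have hsucc : ((s:ℤ)+1) = ((s+1 : ℕ) : ℤ) := by push_cast; ring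
    rw [hcons, List.foldl_cons, hsucc, ih (s+1)]
    simp only [Int.toNat_natCast]
    by_cases hs : s < old.length
    · have hset : old.set s (old.getD s 0 + c) = old.take s ++ (old[s] + c) :: old.drop (s+1) := by
        rw [List.set_eq_take_append_cons_drop, if_pos hs, List.getD_eq_getElem old 0 hs]
      have hlen : (old.take s).length = s := by simp; omega
      rw [hset, List.drop_eq_getElem_cons hs, pvCombine_cons]
      have e1 : s + 1 = (old.take s).length + 1 := by omega
      rw [e1, List.take_length_add_append, List.drop_length_add_append]
      simp
    · have hset : old.set s (old.getD s 0 + c) = old := by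
        rw [List.set_eq_take_append_cons_drop, if_neg hs]
      rw [hset]
      have h1 : old.drop s = [] := by simp; omega
      have h2 : old.drop (s+1) = [] := by simp; omega
      rw [h1, h2, pvCombine_nil, pvCombine_nil]
      simp
      omega

theorem pvLookup_of_mem {data : List (String × List Int)} {k : String} {v : List Int}
    (hnd : (data.map Prod.fst).Nodup) (hm : (k, v) ∈ data) : pvLookup data k = v := by
  induction data with
  | nil => simp at hm
  | cons p rest ih =>
    simp only [List.map_cons, List.nodup_cons] at hnd
    rcases List.mem_cons.mp hm with h | h
    · subst h; simp [pvLookup]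
    · have hk : p.1 ≠ k := by
        intro he; exact hnd.1 (he ▸ (List.mem_map.mpr ⟨(k,v), h, rfl⟩))
      have : pvLookup (p :: rest) k = pvLookup rest k := by
        simp [pvLookup, hk]
      rw [this]; exact ih hnd.2 h

def pvSum (cols : List (List Int)) : List Int := (cols.drop 1).foldl pvCombine (cols.headD [])
def pvMapSum (g : PySem.Dict String (List (List Int))) : PySem.Dict String (List Int) :=
  PySem.Dict.mk (g.items.map (fun pr => (pr.1, pvSum pr.2)))

theorem pvMapSum_contains (g : PySem.Dict String (List (List Int))) (k : String) :
    (pvMapSum g).contains k = g.contains k := by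
  simp [pvMapSum, PySem.Dict.contains, Function.comp_def]

theorem pvMapSum_keys (g : PySem.Dict String (List (List Int))) :
    (pvMapSum g).keys = g.keys := by
  simp [pvMapSum, PySem.Dict.keys]

theorem pvMapSum_insert (g : PySem.Dict String (List (List Int))) (e : String)
    (cols : List (List Int)) :
    pvMapSum (g.insert e cols) = (pvMapSum g).insert e (pvSum cols) := by
  by_cases hc : g.contains e = true
  · have hc' : (pvMapSum g).contains e = true := by rw [pvMapSum_contains]; exact hc
    apply PySem.Dict.ext
    rw [show (pvMapSum (g.insert e cols)).items = (g.insert e cols).items.map (fun pr => (pr.1, pvSum pr.2)) from rfl,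
        PySem.Dict.items_insert_of_contains g cols hc,
        PySem.Dict.items_insert_of_contains _ (pvSum cols) hc',
        show (pvMapSum g).items = g.items.map (fun pr => (pr.1, pvSum pr.2)) from rfl,
        List.map_map, List.map_map]
    apply List.map_congr_left
    intro p hp
    by_cases hpe : p.1 = e <;> simp [hpe]
  · have hc2 : g.contains e = false := by simpa using hc
    have hc' : (pvMapSum g).contains e = false := by rw [pvMapSum_contains]; exact hc2
    apply PySem.Dict.ext
    rw [show (pvMapSum (g.insert e cols)).items = (g.insert e cols).items.map (fun pr => (pr.1, pvSum pr.2)) from rfl,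
        PySem.Dict.items_insert_of_not_contains g cols hc2,
        PySem.Dict.items_insert_of_not_contains _ (pvSum cols) hc']
    simp [pvMapSum]

theorem pvMapSum_getD {g : PySem.Dict String (List (List Int))} {e : String}
    {cols : List (List Int)} (hnd : g.keys.Nodup) (hm : (e, cols) ∈ g.items) :
    (pvMapSum g).getD e [] = pvSum cols := by
  apply PySem.Dict.getD_of_mem_items
  · exact List.mem_map.mpr ⟨(e, cols), hm, rfl⟩
  · rw [pvMapSum_keys]; exact hnd

theorem pvAddLoop_eq (old v : List Int) : pvAddLoop old v = pvCombine old v := by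
  have h := pvAddLoop_go v 0 old
  simpa [pvAddLoop] using h

theorem pvSum_append (cols : List (List Int)) (v : List Int) (h : cols ≠ []) :
    pvSum (cols ++ [v]) = pvCombine (pvSum cols) v := by
  cases cols with
  | nil => exact absurd rfl h
  | cons c cs => simp [pvSum, List.foldl_append]

def pvGood (rest : List (String × List Int)) (g : PySem.Dict String (List (List Int))) : Prop :=
  ∀ r1 v r2, rest = r1 ++ ("student", v) :: r2 →
    g.contains "student" = false ∧ ∀ q ∈ r1, pvKeyOf q.1 ≠ "student"

theorem pv_main (data : List (String × List Int))
    (Hlk : ∀ p ∈ data, pvLookup data p.1 = p.2) :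
    ∀ (rest : List (String × List Int)) (g : PySem.Dict String (List (List Int))),
      (∀ p ∈ rest, p ∈ data) → g.keys.Nodup → (∀ pr ∈ g.items, pr.2 ≠ []) → pvGood rest g →
      rest.foldl (pvStepA data) (pvMapSum g)
      = pvMapSum (rest.foldl
          (fun g p => g.modify (pvKeyOf p.1) [] (fun cols => cols ++ [pvLookup data p.1])) g) := by
  intro rest
  induction rest with
  | nil => intro g _ _ _ _; rfl
  | cons p rest' ih =>
    intro g hmem hnd hne hgood
    obtain ⟨k, v⟩ := p
    have hdata : (k, v) ∈ data := hmem _ (List.mem_cons_self)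
    have hlk : pvLookup data k = v := Hlk _ hdata
    simp only [List.foldl_cons]
    by_cases hk : k = "student"
    · subst hk
      have hst : g.contains "student" = false := (hgood [] v rest' rfl).1
      have hst' : (pvMapSum g).contains "student" = false := by rw [pvMapSum_contains]; exact hst
      have hstep : pvStepA data (pvMapSum g) ("student", v)
          = (pvMapSum g).insert "student" v := by
        simp [pvStepA, hlk]
      have hstepB : g.modify (pvKeyOf "student") [] (fun cols => cols ++ [pvLookup data "student"])
          = g.insert "student" [v] := by
        simp [pvKeyOf, PySem.Dict.modify, PySem.Dict.getD_of_not_contains _ _ hst, hlk]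
      rw [hstep, hstepB, show ((pvMapSum g).insert "student" v) = pvMapSum (g.insert "student" [v]) by
        rw [pvMapSum_insert]; rfl]
      apply ih
      · intro q hq; exact hmem _ (List.mem_cons_of_mem _ hq)
      · exact PySem.Dict.nodup_keys_insert _ _ _ hnd
      · intro pr hpr
        rcases (PySem.Dict.mem_items_insert _ _ _ _).mp hpr with h | h
        · subst h; simp
        · exact hne _ h.1
      · intro r1 v' r2 hr
        exfalso
        have := (hgood (("student", v) :: r1) v' r2 (by rw [hr]; simp)).2
        exact (this _ List.mem_cons_self) (by simp [pvKeyOf])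
    · -- k ≠ "student"
      have hkb : (k == "student") = false := by simp [hk]
      set e := pvKeyOf k with he
      have hexpr : (PySem.List.pyGet? ((PySem.Str.split? k "/").getD []) 1).getD "" = e := by
        rw [he]; simp [pvKeyOf, hkb]
      have hgood' : ∀ r1 v' r2, rest' = r1 ++ ("student", v') :: r2 →
          g.contains "student" = false ∧ e ≠ "student" ∧ ∀ q ∈ r1, pvKeyOf q.1 ≠ "student" := by
        intro r1 v' r2 hr
        have h := hgood ((k, v) :: r1) v' r2 (by rw [hr]; simp)
        exact ⟨h.1, h.2 _ List.mem_cons_self, fun q hq => h.2 _ (List.mem_cons_of_mem _ hq)⟩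
      have hstepB : g.modify e [] (fun cols => cols ++ [pvLookup data k])
          = g.insert e (g.getD e [] ++ [v]) := by
        simp [PySem.Dict.modify, hlk]
      by_cases hc : g.contains e = true
      · -- existing group
        obtain ⟨cols, hcols⟩ : ∃ cols, (e, cols) ∈ g.items := by
          rcases List.mem_map.mp ((PySem.Dict.contains_iff_mem_keys g e).mp hc) with ⟨pr, hpr, hfst⟩
          exact ⟨pr.2, by rw [← hfst]; exact hpr⟩
        have hgetg : g.getD e [] = cols := PySem.Dict.getD_of_mem_items _ hcols hnd _
        have hgetm : (pvMapSum g).getD e [] = pvSum cols := pvMapSum_getD hnd hcols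
        have hc' : (pvMapSum g).contains e = true := by rw [pvMapSum_contains]; exact hc
        have hstep : pvStepA data (pvMapSum g) (k, v)
            = (pvMapSum g).insert e (pvAddLoop (pvSum cols) v) := by
          simp only [pvStepA, hkb, Bool.false_eq_true, if_false, hexpr, hc', hlk,
            PySem.Dict.modify, hgetm]
          simp
        rw [hstep, hstepB, hgetg, pvAddLoop_eq,
          ← pvSum_append cols v (hne _ hcols), ← pvMapSum_insert]
        apply ih
        · intro q hq; exact hmem _ (List.mem_cons_of_mem _ hq)
        · exact PySem.Dict.nodup_keys_insert _ _ _ hnd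
        · intro pr hpr
          rcases (PySem.Dict.mem_items_insert _ _ _ _).mp hpr with h | h
          · subst h; simp
          · exact hne _ h.1
        · intro r1 v' r2 hr
          obtain ⟨h1, h2, h3⟩ := hgood' r1 v' r2 hr
          refine ⟨?_, h3⟩
          rw [PySem.Dict.contains_insert]
          simp [h1]
          intro hh; exact h2 hh.symm
      · have hc2 : g.contains e = false := by simpa using hc
        have hc' : (pvMapSum g).contains e = false := by rw [pvMapSum_contains]; exact hc2
        have hstep : pvStepA data (pvMapSum g) (k, v)
            = (pvMapSum g).insert e v := by
          simp only [pvStepA, hkb, Bool.false_eq_true, if_false, hexpr, hc', if_true, hlk]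
        have hgd : g.getD e [] = [] := PySem.Dict.getD_of_not_contains _ _ hc2
        rw [hstep, hstepB, hgd, show ((pvMapSum g).insert e v) = pvMapSum (g.insert e ([] ++ [v])) by
          rw [pvMapSum_insert]; rfl]
        apply ih
        · intro q hq; exact hmem _ (List.mem_cons_of_mem _ hq)
        · exact PySem.Dict.nodup_keys_insert _ _ _ hnd
        · intro pr hpr
          rcases (PySem.Dict.mem_items_insert _ _ _ _).mp hpr with h | h
          · subst h; simp
          · exact hne _ h.1
        · intro r1 v' r2 hr
          obtain ⟨h1, h2, h3⟩ := hgood' r1 v' r2 hr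
          refine ⟨?_, h3⟩
          rw [PySem.Dict.contains_insert]
          simp [h1]
          intro hh; exact h2 hh.symm

theorem pvGood_init (data : List (String × List Int)) (hpre : Pre_merge_exercise_columns data) :
    pvGood data PySem.Dict.empty := by
  intro r1 v r2 hdec
  subst hdec
  refine ⟨PySem.Dict.contains_empty _, ?_⟩
  intro q hq hkey
  obtain ⟨m, hm, hqm⟩ := List.mem_iff_getElem.mp hq
  have hjlen : r1.length < (r1 ++ ("student", v) :: r2).length := by simp
  have hmlen : m < (r1 ++ ("student", v) :: r2).length := by simp; omega
  have hdj : (r1 ++ ("student", v) :: r2)[r1.length]! = ("student", v) := by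
    rw [getElem!_pos (r1 ++ ("student", v) :: r2) r1.length hjlen]; simp
  have hdm : (r1 ++ ("student", v) :: r2)[m]! = q := by
    rw [getElem!_pos (r1 ++ ("student", v) :: r2) m hmlen]
    rw [show (r1 ++ ("student", v) :: r2)[m]'hmlen = r1[m]'hm from by
      simp [List.getElem_append_left hm]]
    exact hqm
  have hexists : ∃ n, pvKeyOf (((r1 ++ ("student", v) :: r2)[n]!).1) = "student"
      ∧ n < (r1 ++ ("student", v) :: r2).length :=
    ⟨m, by rw [hdm]; exact hkey, hmlen⟩
  let i0 := Nat.find hexists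
  have hi0 : pvKeyOf (((r1 ++ ("student", v) :: r2)[i0]!).1) = "student"
      ∧ i0 < (r1 ++ ("student", v) :: r2).length := Nat.find_spec hexists
  have hi0le : i0 ≤ m := Nat.find_min' hexists ⟨by rw [hdm]; exact hkey, hmlen⟩
  have hi0j : i0 < r1.length := by omega
  have h3 := hpre.2.2 i0 (List.mem_range.mpr hi0.2) r1.length (List.mem_range.mpr hjlen) hi0j
  have hkeyeq : pvKeyOf (((r1 ++ ("student", v) :: r2)[i0]!).1)
      = pvKeyOf (((r1 ++ ("student", v) :: r2)[r1.length]!).1) := by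
    rw [hi0.1, hdj]; simp [pvKeyOf]
  have hmin : ∀ m' ∈ List.range i0,
      pvKeyOf (((r1 ++ ("student", v) :: r2)[m']!).1)
      ≠ pvKeyOf (((r1 ++ ("student", v) :: r2)[i0]!).1) := by
    intro m' hm' hcon
    have hlt := List.mem_range.mp hm'
    exact Nat.find_min hexists hlt ⟨hcon.trans hi0.1, by omega⟩
  have hfin := (h3 hkeyeq hmin).1
  rw [hdj] at hfin
  exact hfin rfl

theorem pv_final (data : List (String × List Int)) (hpre : Pre_merge_exercise_columns data) :
    merge_exercise_columns data = merge_exercise_columns_alt data := by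
  obtain ⟨hnd, hsl, h3⟩ := hpre
  have Hlk : ∀ p ∈ data, pvLookup data p.1 = p.2 := by
    intro p hp
    exact pvLookup_of_mem hnd (by exact hp)
  have hmain := pv_main data Hlk data PySem.Dict.empty (fun p hp => hp)
    (by simp [PySem.Dict.empty, PySem.Dict.keys]) (by simp [PySem.Dict.empty])
    (pvGood_init data ⟨hnd, hsl, h3⟩)
  have hG : merge_exercise_columns data
      = (pvMapSum (data.foldl
          (fun g p => g.modify (pvKeyOf p.1) [] (fun cols => cols ++ [pvLookup data p.1]))
          PySem.Dict.empty)).items := by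
    rw [merge_exercise_columns]
    rw [show (PySem.Dict.empty : PySem.Dict String (List Int)) = pvMapSum PySem.Dict.empty from rfl]
    rw [hmain]
  set G := data.foldl
      (fun g p => g.modify (pvKeyOf p.1) [] (fun cols => cols ++ [pvLookup data p.1]))
      PySem.Dict.empty with hGdef
  have hndG : G.keys.Nodup := by
    rw [hGdef]
    exact PySem.Dict.nodup_keys_foldl_modify_key data (fun p => pvKeyOf p.1) []
      (fun _ p => (fun cols => cols ++ [pvLookup data p.1])) PySem.Dict.empty
      (by simp [PySem.Dict.empty, PySem.Dict.keys])
  have halt : merge_exercise_columns_alt data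
      = G.items.map (fun pr => (pr.1, (pr.2.drop 1).foldl pvCombine (pr.2.headD []))) := by
    rw [merge_exercise_columns_alt]
    have := PySem.Dict.items_foldl_insert_fresh G.items (fun pr => pr.1)
      (fun pr => (pr.2.drop 1).foldl pvCombine (pr.2.headD [])) PySem.Dict.empty
      (fun a _ => PySem.Dict.contains_empty _) hndG
    simpa using this
  rw [hG, halt]
  rfl

-- ===== VERDICT (by name: the statement is the Claim_ definition above) =====
theorem merge_exercise_columns_spec : Claim_equal_merge_exercise_columns := by
  intro data _ hpre
  unfold Spec_merge_exercise_columns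
  exact pv_final data hpre
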